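-- pv_equiv track=rewrite | github.com/bigshanedogg/torch-blenderbot-pretrained | transformer/preprocessors/utils.py | split_segment_by_speaker_ids
-- ===== SOURCE A (Python) =====
-- def split_segment_by_speaker_ids(utterances, speaker_ids):
--     sequence_utterances = []
--     sequence_turn_ids = []
--     segment_utterances = []
--     segment_turn_ids = []
--     first_speaker_id = speaker_ids[0]
--     replied = False
--     for idx, (speaker_id, utterance) in enumerate(zip(speaker_ids, utterances)):
--         if replied and speaker_id == first_speaker_id:
--             sequence_utterances.append(segment_utterances)
--             sequence_turn_ids.append(segment_turn_ids)
--             segment_utterances = []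
--             segment_turn_ids = []
--             replied = False
--         segment_utterances.append(utterance)
--         segment_turn_ids.append(speaker_id)
--         if speaker_id != first_speaker_id: replied = True
--     sequence_utterances.append(segment_utterances)
--     sequence_turn_ids.append(segment_turn_ids)
--     return sequence_utterances, sequence_turn_ids
-- ===== SOURCE B (Python) =====
-- def split_segment_by_speaker_ids(utterances, speaker_ids):
--     first = speaker_ids[0]
--     rest = list(zip(speaker_ids, utterances))
--     segments = []
--     while True:
--         # one segment = leading run of first-speaker turns, then the run of
--         # replies (non-first speakers); continue on what remains
--         i = 0
--         while i < len(rest) and rest[i][0] == first: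
--             i += 1
--         while i < len(rest) and rest[i][0] != first:
--             i += 1
--         segments.append(rest[:i])
--         rest = rest[i:]
--         if not rest:
--             break
--     return ([[u for _, u in seg] for seg in segments],
--             [[s for s, _ in seg] for seg in segments])
-- ===== Notes on version B (the rewrite author's own statement) =====
-- stated objective: alternative
-- what changed: Replaces A's single fold with a mutable replied flag and segment accumulators by a recursive decomposition: each segment is extracted as the leading run of first-speaker turns followed by the run of replies (two scans), then recurse on the remainder; outputs are built by projecting the segments at the end.
import Mathlib
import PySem

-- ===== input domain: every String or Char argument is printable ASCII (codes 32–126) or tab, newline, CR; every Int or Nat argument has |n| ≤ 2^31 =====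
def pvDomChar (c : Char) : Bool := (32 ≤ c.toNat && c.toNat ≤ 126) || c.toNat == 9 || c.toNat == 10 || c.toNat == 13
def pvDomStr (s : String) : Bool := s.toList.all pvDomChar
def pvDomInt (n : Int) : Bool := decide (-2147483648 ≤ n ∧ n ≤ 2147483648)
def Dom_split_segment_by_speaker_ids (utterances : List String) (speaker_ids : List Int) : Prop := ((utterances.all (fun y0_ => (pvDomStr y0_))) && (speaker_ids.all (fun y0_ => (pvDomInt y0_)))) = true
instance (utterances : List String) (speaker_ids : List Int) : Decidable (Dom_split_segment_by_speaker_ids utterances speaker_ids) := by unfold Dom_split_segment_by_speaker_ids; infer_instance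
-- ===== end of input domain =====

-- B extracts each segment by a recursive run-decomposition (leading first-speaker run,
-- then the reply run) instead of A's single fold with a replied flag; same cost, alternative structure.


-- ===== PORT A =====
-- loop body of A (the enumerate index idx is never used by A, so the fold carries no index);
-- state = (sequence_utterances, sequence_turn_ids, segment_utterances, segment_turn_ids, replied)
def pvStepA (first : Int)
    (s : List (List String) × List (List Int) × List String × List Int × Bool)
    (p : Int × String) :
    List (List String) × List (List Int) × List String × List Int × Bool :=
  match s, p with
  | (su, st, cu, ct, replied), (sid, utt) =>
    match (if replied && sid == first then
        (su ++ [cu], st ++ [ct], ([] : List String), ([] : List Int), false)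
      else (su, st, cu, ct, replied)) with
    | (su, st, cu, ct, replied) =>
      (su, st, cu ++ [utt], ct ++ [sid], replied || (sid != first))

def split_segment_by_speaker_ids (utterances : List String) (speaker_ids : List Int) : List (List String) × List (List Int) :=
  let first := speaker_ids.headD 0  -- speaker_ids[0]; Pre_ excludes [], where Python raises IndexError
  match (speaker_ids.zip utterances).foldl (pvStepA first) ([], [], [], [], false) with
  | (su, st, cu, ct, _) => (su ++ [cu], st ++ [ct])

-- ===== PORT B =====
-- _segments: the first while loop scans the leading run with speaker == first (takeWhile/dropWhile),
-- the second continues through the run with speaker != first; rest[:i] = a ++ b, rest[i:] = r2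
def pvSegments (first : Int) (rest : List (Int × String)) : List (List (Int × String)) :=
  -- a = rest[:i] after the first while loop, b = the slice scanned by the second while loop,
  -- r2 = rest[i:]; written inline (no let) so the proofs can rewrite the branches directly
  if h : (rest.dropWhile (fun p => p.1 == first)).dropWhile (fun p => p.1 != first) = [] then
    [rest.takeWhile (fun p => p.1 == first)
      ++ (rest.dropWhile (fun p => p.1 == first)).takeWhile (fun p => p.1 != first)]
  else
    (rest.takeWhile (fun p => p.1 == first)
      ++ (rest.dropWhile (fun p => p.1 == first)).takeWhile (fun p => p.1 != first))
    :: pvSegments first ((rest.dropWhile (fun p => p.1 == first)).dropWhile (fun p => p.1 != first))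
termination_by rest.length
decreasing_by
  have hr1 : rest.dropWhile (fun p => p.1 == first) ≠ [] := by
    intro he; rw [he] at h; exact h rfl
  have hhead := List.head_dropWhile_not (fun (p : Int × String) => p.1 == first) hr1
  calc ((rest.dropWhile (fun p => p.1 == first)).dropWhile (fun p => p.1 != first)).length
      < (rest.dropWhile (fun p => p.1 == first)).length := by
        cases hc : rest.dropWhile (fun p => p.1 == first) with
        | nil => exact absurd hc hr1
        | cons x xs =>
          have hx : ((fun (p : Int × String) => p.1 != first) x) = true := by
            simp only [hc, List.head_cons] at hhead
            simpa [bne] using hhead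
          rw [List.dropWhile_cons, if_pos hx]
          exact Nat.lt_succ_of_le (List.length_dropWhile_le _ xs)
    _ ≤ rest.length := List.length_dropWhile_le _ _

def split_segment_by_speaker_ids_alt (utterances : List String) (speaker_ids : List Int) : List (List String) × List (List Int) :=
  let first := speaker_ids.headD 0  -- speaker_ids[0]; Pre_ excludes [], where Python raises IndexError
  let segments := pvSegments first (speaker_ids.zip utterances)
  (segments.map (fun seg => seg.map (fun p => p.2)),
   segments.map (fun seg => seg.map (fun p => p.1)))

-- ===== PRECONDITION & SPEC =====
-- A evaluates speaker_ids[0]: Pre_ excludes empty speaker_ids, where Python A raises IndexError (B raises too).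
def Pre_split_segment_by_speaker_ids (utterances : List String) (speaker_ids : List Int) : Prop := speaker_ids ≠ []
instance (utterances : List String) (speaker_ids : List Int) : Decidable (Pre_split_segment_by_speaker_ids utterances speaker_ids) := by unfold Pre_split_segment_by_speaker_ids; infer_instance

def pvWitness_split_segment_by_speaker_ids : List String × List Int := (["hi", "yo", "ok"], [1, 2, 1])

def Spec_split_segment_by_speaker_ids (utterances : List String) (speaker_ids : List Int) (out : List (List String) × List (List Int)) : Prop := out = split_segment_by_speaker_ids_alt utterances speaker_ids
instance (utterances : List String) (speaker_ids : List Int) (out : List (List String) × List (List Int)) : Decidable (Spec_split_segment_by_speaker_ids utterances speaker_ids out) := by unfold Spec_split_segment_by_speaker_ids; infer_instance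

-- ===== CLAIM (what is proved, stated in full; the proofs are below) =====
def Claim_equal_split_segment_by_speaker_ids : Prop := ∀ (utterances : List String) (speaker_ids : List Int), Dom_split_segment_by_speaker_ids utterances speaker_ids → Pre_split_segment_by_speaker_ids utterances speaker_ids → Spec_split_segment_by_speaker_ids utterances speaker_ids (split_segment_by_speaker_ids utterances speaker_ids)

-- ===== LEMMAS AND PROOFS =====

-- folding A's step over a run of first-speaker turns with replied = false just accumulates
theorem foldA_run_first (first : Int) (a : List (Int × String))
    (ha : ∀ p ∈ a, (p.1 == first) = true) (su : List (List String)) (st : List (List Int))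
    (cu : List String) (ct : List Int) :
    a.foldl (pvStepA first) (su, st, cu, ct, false)
      = (su, st, cu ++ a.map (fun p => p.2), ct ++ a.map (fun p => p.1), false) := by
  induction a generalizing cu ct with
  | nil => simp
  | cons p rest ih =>
    obtain ⟨sid, utt⟩ := p
    have hp : (sid == first) = true := ha _ (List.mem_cons_self ..)
    have hrest : ∀ q ∈ rest, (q.1 == first) = true := fun q hq => ha q (List.mem_cons_of_mem _ hq)
    have hstep : pvStepA first (su, st, cu, ct, false) (sid, utt)
        = (su, st, cu ++ [utt], ct ++ [sid], false) := by
      simp [pvStepA, bne, hp]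
    rw [List.foldl_cons, hstep, ih hrest]
    simp

-- folding A's step over a run of non-first-speaker turns accumulates and sets replied iff nonempty
theorem foldA_run_other (first : Int) (b : List (Int × String))
    (hb : ∀ p ∈ b, (p.1 == first) = false) (su : List (List String)) (st : List (List Int))
    (cu : List String) (ct : List Int) (replied : Bool) :
    b.foldl (pvStepA first) (su, st, cu, ct, replied)
      = (su, st, cu ++ b.map (fun p => p.2), ct ++ b.map (fun p => p.1), replied || !b.isEmpty) := by
  induction b generalizing cu ct replied with
  | nil => simp
  | cons p rest ih =>
    obtain ⟨sid, utt⟩ := p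
    have hp : (sid == first) = false := hb _ (List.mem_cons_self ..)
    have hrest : ∀ q ∈ rest, (q.1 == first) = false := fun q hq => hb q (List.mem_cons_of_mem _ hq)
    have hstep : pvStepA first (su, st, cu, ct, replied) (sid, utt)
        = (su, st, cu ++ [utt], ct ++ [sid], true) := by
      simp [pvStepA, bne, hp]
    rw [List.foldl_cons, hstep, ih hrest]
    simp

-- turns the replied flag computed after a nonempty reply run into the literal true
theorem hbne_rw {α : Type} {l : List α} (h : l.isEmpty = false)
    {su : List (List String)} {st : List (List Int)} {cu : List String} {ct : List Int} :
    (su, st, cu, ct, false || !l.isEmpty) = (su, st, cu, ct, true) := by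
  rw [h]; rfl

-- main invariant: finalizing A's fold from a fresh segment equals appending B's segments
theorem foldA_eq_segments (first : Int) (rest : List (Int × String)) :
    ∀ (su : List (List String)) (st : List (List Int)),
    ((rest.foldl (pvStepA first) (su, st, [], [], false)).1
        ++ [(rest.foldl (pvStepA first) (su, st, [], [], false)).2.2.1],
     (rest.foldl (pvStepA first) (su, st, [], [], false)).2.1
        ++ [(rest.foldl (pvStepA first) (su, st, [], [], false)).2.2.2.1])
      = (su ++ (pvSegments first rest).map (fun seg => seg.map (fun p => p.2)),
         st ++ (pvSegments first rest).map (fun seg => seg.map (fun p => p.1))) := by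
  induction rest using pvSegments.induct first with
  | case1 x h =>
    intro su st
    have hx : x = x.takeWhile (fun p => p.1 == first)
        ++ ((x.dropWhile (fun p => p.1 == first)).takeWhile (fun p => p.1 != first)
        ++ (x.dropWhile (fun p => p.1 == first)).dropWhile (fun p => p.1 != first)) := by
      rw [List.takeWhile_append_dropWhile, List.takeWhile_append_dropWhile]
    have ha : ∀ p ∈ x.takeWhile (fun (p : Int × String) => p.1 == first), (p.1 == first) = true :=
      fun r hr => List.mem_takeWhile_imp (p := fun (q : Int × String) => q.1 == first) hr
    have hb : ∀ p ∈ (x.dropWhile (fun (p : Int × String) => p.1 == first)).takeWhile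
        (fun (p : Int × String) => p.1 != first), (p.1 == first) = false := by
      intro p hp
      have := List.mem_takeWhile_imp hp
      simpa [bne] using this
    conv_lhs => rw [hx]
    rw [List.foldl_append, List.foldl_append, foldA_run_first first _ ha,
        foldA_run_other first _ hb, h, List.foldl_nil, pvSegments, dif_pos h]
    simp
  | case2 x h ih =>
    intro su st
    have hx : x = x.takeWhile (fun p => p.1 == first)
        ++ ((x.dropWhile (fun p => p.1 == first)).takeWhile (fun p => p.1 != first)
        ++ (x.dropWhile (fun p => p.1 == first)).dropWhile (fun p => p.1 != first)) := by
      rw [List.takeWhile_append_dropWhile, List.takeWhile_append_dropWhile]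
    have ha : ∀ p ∈ x.takeWhile (fun (p : Int × String) => p.1 == first), (p.1 == first) = true :=
      fun r hr => List.mem_takeWhile_imp (p := fun (q : Int × String) => q.1 == first) hr
    have hb : ∀ p ∈ (x.dropWhile (fun (p : Int × String) => p.1 == first)).takeWhile
        (fun (p : Int × String) => p.1 != first), (p.1 == first) = false := by
      intro p hp
      have := List.mem_takeWhile_imp hp
      simpa [bne] using this
    -- the run of replies is nonempty, so replied is true when the next segment starts
    have hr1 : x.dropWhile (fun (p : Int × String) => p.1 == first) ≠ [] := by
      intro he; rw [he] at h; exact h rfl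
    have hb_ne : ((x.dropWhile (fun (p : Int × String) => p.1 == first)).takeWhile
        (fun (p : Int × String) => p.1 != first)).isEmpty = false := by
      have hhead := List.head_dropWhile_not (fun (p : Int × String) => p.1 == first) hr1
      cases hc : x.dropWhile (fun (p : Int × String) => p.1 == first) with
      | nil => exact absurd hc hr1
      | cons y ys =>
        simp only [hc, List.head_cons] at hhead
        have hy : ((fun (p : Int × String) => p.1 != first) y) = true := by
          simpa [bne] using hhead
        simp [hy]
    -- the next segment starts with a first-speaker turn
    obtain ⟨q, qs, hq⟩ : ∃ q qs, (x.dropWhile (fun (p : Int × String) => p.1 == first)).dropWhile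
        (fun (p : Int × String) => p.1 != first) = q :: qs := by
      cases hc : (x.dropWhile (fun (p : Int × String) => p.1 == first)).dropWhile
          (fun (p : Int × String) => p.1 != first) with
      | nil => exact absurd hc h
      | cons q qs => exact ⟨q, qs, rfl⟩
    have hqfirst : (q.1 == first) = true := by
      have := List.head_dropWhile_not (fun (p : Int × String) => p.1 != first) h
      simp only [hq, List.head_cons] at this
      simpa [bne] using this
    conv_lhs => rw [hx]
    rw [List.foldl_append, List.foldl_append, foldA_run_first first _ ha,
        foldA_run_other first _ hb, hbne_rw hb_ne, hq]
    obtain ⟨qsid, qutt⟩ := q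
    simp only [beq_iff_eq] at hqfirst
    have hstep1 : ∀ (su' : List (List String)) (st' : List (List Int)) (cu : List String) (ct : List Int),
        pvStepA first (su', st', cu, ct, true) (qsid, qutt)
        = (su' ++ [cu], st' ++ [ct], [qutt], [qsid], false) := by
      intro su' st' cu ct
      simp [pvStepA, bne, hqfirst]
    have hstep2 : ∀ (su' : List (List String)) (st' : List (List Int)),
        pvStepA first (su', st', [], [], false) (qsid, qutt)
        = (su', st', [qutt], [qsid], false) := by
      intro su' st'
      simp [pvStepA, bne, hqfirst]
    simp only [List.nil_append]
    rw [List.foldl_cons, hstep1]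
    have ih' := ih (su ++ [(x.takeWhile (fun p => p.1 == first)).map (fun p => p.2)
          ++ ((x.dropWhile (fun p => p.1 == first)).takeWhile (fun p => p.1 != first)).map (fun p => p.2)])
        (st ++ [(x.takeWhile (fun p => p.1 == first)).map (fun p => p.1)
          ++ ((x.dropWhile (fun p => p.1 == first)).takeWhile (fun p => p.1 != first)).map (fun p => p.1)])
    rw [hq, List.foldl_cons, hstep2] at ih'
    conv_rhs => rw [pvSegments]
    rw [dif_neg h, hq, ih']
    simp

-- ===== VERDICT (by name: the statement is the Claim_ definition above) =====
theorem split_segment_by_speaker_ids_spec : Claim_equal_split_segment_by_speaker_ids := by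
  intro utterances speaker_ids _ _
  unfold Spec_split_segment_by_speaker_ids split_segment_by_speaker_ids split_segment_by_speaker_ids_alt
  dsimp only
  have hmain := foldA_eq_segments (speaker_ids.headD 0) (speaker_ids.zip utterances) [] []
  simp only [List.nil_append] at hmain
  rcases hF : (speaker_ids.zip utterances).foldl (pvStepA (speaker_ids.headD 0)) ([], [], [], [], false)
    with ⟨a1, a2, a3, a4, a5⟩
  rw [hF] at hmain
  exact hmain
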